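-- pv_equiv track=rewrite | github.com/LenaWil/openteacher | modules/org/openteacher/ocr/wordListLoader/wordListLoader.py | _sortAndDetectColumns
-- ===== SOURCE A (Python) =====
-- def _sortAndDetectColumns(rows, margin):
-- 	#vertical margin can safely be a bit higher. 4 makes it tolerate
-- 	#a tab.
-- 	margin *= 4
-- 	columnsTable = []
-- 	for row in rows:
-- 		row = sorted(row, key=lambda rect: rect["x"])
--
-- 		lastElement = None
-- 		columns = []
-- 		columnsTable.append(columns)
-- 		for rect in row:
-- 			if lastElement and rect["x"] - lastElement["x"] < margin:
-- 				currentColumn.append(rect)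
-- 			else:
-- 				currentColumn = [rect]
-- 				columns.append(currentColumn)
-- 			lastElement = rect
-- 	return columnsTable
-- ===== SOURCE B (Python) =====
-- def _sortAndDetectColumns(rows, margin):
--     m = margin * 4
--     table = []
--     for row in rows:
--         srow = sorted(row, key=lambda r: r["x"])
--         splits = [i + 1 for i, (a, b) in enumerate(zip(srow, srow[1:])) if b["x"] - a["x"] >= m]
--         bounds = [0] + splits + [len(srow)]
--         table.append([srow[a:b] for a, b in zip(bounds, bounds[1:]) if a < b])
--     return table
-- ===== Notes on version B (the rewrite author's own statement) =====
-- stated objective: alternative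
-- what changed: A grows columns imperatively with a mutable last-column pointer in a stateful scan; B first computes the list of split indices from adjacent x-gaps of the sorted row and then slices the sorted row between successive boundaries.
import Mathlib
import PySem

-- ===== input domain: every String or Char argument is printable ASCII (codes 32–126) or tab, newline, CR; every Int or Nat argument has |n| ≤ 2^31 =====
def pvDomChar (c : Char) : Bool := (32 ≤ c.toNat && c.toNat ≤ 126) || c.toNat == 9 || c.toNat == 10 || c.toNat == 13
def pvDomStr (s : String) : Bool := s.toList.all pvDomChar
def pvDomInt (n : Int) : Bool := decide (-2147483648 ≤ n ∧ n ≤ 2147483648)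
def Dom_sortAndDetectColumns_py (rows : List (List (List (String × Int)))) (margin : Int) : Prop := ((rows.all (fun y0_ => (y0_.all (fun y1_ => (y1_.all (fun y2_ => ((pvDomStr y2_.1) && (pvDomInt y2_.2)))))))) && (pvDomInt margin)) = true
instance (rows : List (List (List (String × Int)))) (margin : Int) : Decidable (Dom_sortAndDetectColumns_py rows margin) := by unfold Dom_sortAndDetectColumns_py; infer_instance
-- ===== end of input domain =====

-- B computes each row's columns by first listing the split indices (adjacent x-gaps reaching the
-- margin) and then slicing the sorted row between successive boundaries, instead of A's stateful
-- scan that mutates a current-column pointer. Objective: alternative decomposition; same cost.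

-- ===== PORT A =====
-- rect["x"]: first-match association-list lookup; the default 0 is never reached inside Pre_
-- (Pre_ excludes rects lacking "x", where Python's sorted key raises KeyError).
def pvGetX (rect : List (String × Int)) : Int := (rect.lookup "x").getD 0

-- Python's currentColumn.append(rect) mutates the list that is the LAST element of columns.
def pvAppendLast (cols : List (List (List (String × Int)))) (rect : List (String × Int)) :
    List (List (List (String × Int))) :=
  match cols with
  | [] => []
  | [c] => [c ++ [rect]]
  | c :: cs => c :: pvAppendLast cs rect

def sortAndDetectColumns_py (rows : List (List (List (String × Int)))) (margin : Int) :
    List (List (List (List (String × Int)))) :=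
  let margin := margin * 4
  rows.foldl (fun columnsTable row =>
    let row := PySem.List.sorted row (fun rect => pvGetX rect) false
    let st := row.foldl
      (fun (st : Option (List (String × Int)) × List (List (List (String × Int)))) rect =>
        match st.1 with
        | some lastElement =>
            -- `if lastElement and …`: a dict is truthy iff nonempty
            if lastElement ≠ [] ∧ pvGetX rect - pvGetX lastElement < margin then
              (some rect, pvAppendLast st.2 rect)
            else
              (some rect, st.2 ++ [[rect]])
        | none => (some rect, st.2 ++ [[rect]]))
      (none, [])
    columnsTable ++ [st.2]) []

-- ===== PORT B =====
def sortAndDetectColumns_py_alt (rows : List (List (List (String × Int)))) (margin : Int) :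
    List (List (List (List (String × Int)))) :=
  let m := margin * 4
  rows.map (fun row =>
    let srow := PySem.List.sorted row (fun r => pvGetX r) false
    let splits := ((PySem.List.enumerate (srow.zip (PySem.List.slice srow (some 1) none)) 0).filter
        (fun p => decide (pvGetX p.2.2 - pvGetX p.2.1 ≥ m))).map (fun p => p.1 + 1)
    let bounds := [(0 : Int)] ++ splits ++ [(srow.length : Int)]
    ((bounds.zip (PySem.List.slice bounds (some 1) none)).filter (fun p => decide (p.1 < p.2))).map
      (fun p => PySem.List.slice srow (some p.1) (some p.2)))

-- ===== PRECONDITION & SPEC =====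
-- Pre_ excludes exactly the inputs where A raises KeyError: a rect without an "x" key.
def Pre_sortAndDetectColumns_py (rows : List (List (List (String × Int)))) (margin : Int) : Prop :=
  rows.all (fun row => row.all (fun rect => (rect.lookup "x").isSome)) = true
instance (rows : List (List (List (String × Int)))) (margin : Int) : Decidable (Pre_sortAndDetectColumns_py rows margin) := by unfold Pre_sortAndDetectColumns_py; infer_instance

def pvWitness_sortAndDetectColumns_py : (List (List (List (String × Int)))) × Int :=
  ([[[("x", 9), ("y", 1)], [("x", 0)]], [], [[("x", 3)]]], 2)

def Spec_sortAndDetectColumns_py (rows : List (List (List (String × Int)))) (margin : Int) (out : List (List (List (List (String × Int))))) : Prop := out = sortAndDetectColumns_py_alt rows margin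
instance (rows : List (List (List (String × Int)))) (margin : Int) (out : List (List (List (List (String × Int))))) : Decidable (Spec_sortAndDetectColumns_py rows margin out) := by unfold Spec_sortAndDetectColumns_py; infer_instance

-- ===== CLAIM (what is proved, stated in full; the proofs are below) =====
def Claim_equal_sortAndDetectColumns_py : Prop := ∀ (rows : List (List (List (String × Int)))) (margin : Int), Dom_sortAndDetectColumns_py rows margin → Pre_sortAndDetectColumns_py rows margin → Spec_sortAndDetectColumns_py rows margin (sortAndDetectColumns_py rows margin)

-- ===== LEMMAS AND PROOFS =====

-- the common reference: group a row into columns, breaking where the x-gap reaches m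
def pvGrp (m : Int) : List (List (String × Int)) → List (List (List (String × Int)))
  | [] => []
  | [r] => [[r]]
  | r :: r2 :: rs =>
    let g := pvGrp m (r2 :: rs)
    if pvGetX r2 - pvGetX r < m then (r :: g.headD []) :: g.tail else [r] :: g

-- A's inner loop step, named for the lemmas (definitionally the lambda in port A)
def pvStepA (m : Int) (st : Option (List (String × Int)) × List (List (List (String × Int))))
    (rect : List (String × Int)) : Option (List (String × Int)) × List (List (List (String × Int))) :=
  match st.1 with
  | some lastElement =>
      if lastElement ≠ [] ∧ pvGetX rect - pvGetX lastElement < m then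
        (some rect, pvAppendLast st.2 rect)
      else
        (some rect, st.2 ++ [[rect]])
  | none => (some rect, st.2 ++ [[rect]])

-- B's split indices and slicing, named for the lemmas (definitionally the body of port B)
def pvSplits (m : Int) (l : List (List (String × Int))) : List Int :=
  ((PySem.List.enumerate (l.zip (PySem.List.slice l (some 1) none)) 0).filter
      (fun p => decide (pvGetX p.2.2 - pvGetX p.2.1 ≥ m))).map (fun p => p.1 + 1)

def pvPieces (l : List (List (String × Int))) (bounds : List Int) : List (List (List (String × Int))) :=
  ((bounds.zip (PySem.List.slice bounds (some 1) none)).filter (fun p => decide (p.1 < p.2))).map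
    (fun p => PySem.List.slice l (some p.1) (some p.2))

def pvCols (m : Int) (l : List (List (String × Int))) : List (List (List (String × Int))) :=
  pvPieces l ([(0 : Int)] ++ pvSplits m l ++ [(l.length : Int)])

lemma pvAppendLast_append (cols : List (List (List (String × Int)))) (c : List (List (String × Int)))
    (r : List (String × Int)) : pvAppendLast (cols ++ [c]) r = cols ++ [c ++ [r]] := by
  induction cols with
  | nil => rfl
  | cons c0 cs ih =>
    cases cs with
    | nil => rfl
    | cons c1 cs' => simpa [pvAppendLast] using ih

lemma pvGrp_shape (m : Int) (a : List (String × Int)) (l : List (List (String × Int))) :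
    ∃ s gs, pvGrp m (a :: l) = (a :: s) :: gs := by
  cases l with
  | nil => exact ⟨[], [], rfl⟩
  | cons b t =>
    simp only [pvGrp]
    split_ifs with h
    · exact ⟨(pvGrp m (b :: t)).headD [], (pvGrp m (b :: t)).tail, rfl⟩
    · exact ⟨[], pvGrp m (b :: t), rfl⟩

lemma pvA_inv (m : Int) (l : List (List (String × Int))) (hl : ∀ r ∈ l, r ≠ []) :
    ∀ (last : List (String × Int)), last ≠ [] →
    ∀ (cols : List (List (List (String × Int)))) (cur : List (List (String × Int))),
    l.foldl (pvStepA m) (some last, cols ++ [cur])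
      = (some (l.foldl (fun _ r => r) last),
         cols ++ (cur ++ ((pvGrp m (last :: l)).headD []).tail) :: (pvGrp m (last :: l)).tail) := by
  induction l with
  | nil => intro last _ cols cur; simp [pvGrp]
  | cons r rs ih =>
    intro last hlast cols cur
    have hr : r ≠ [] := hl r (by simp)
    have hl' : ∀ x ∈ rs, x ≠ [] := fun x hx => hl x (List.mem_cons_of_mem _ hx)
    obtain ⟨s, gs, hshape⟩ := pvGrp_shape m r rs
    simp only [List.foldl_cons]
    by_cases h : pvGetX r - pvGetX last < m
    · have hstep : pvStepA m (some last, cols ++ [cur]) r = (some r, cols ++ [cur ++ [r]]) := by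
        simp only [pvStepA]
        rw [if_pos ⟨hlast, h⟩, pvAppendLast_append]
      rw [hstep, ih hl' r hr cols (cur ++ [r])]
      have hg : pvGrp m (last :: r :: rs)
          = (last :: (pvGrp m (r :: rs)).headD []) :: (pvGrp m (r :: rs)).tail := by
        simp only [pvGrp]; rw [if_pos h]
      rw [hg, hshape]
      simp
    · have hstep : pvStepA m (some last, cols ++ [cur]) r = (some r, (cols ++ [cur]) ++ [[r]]) := by
        simp only [pvStepA]
        rw [if_neg (by tauto)]
      rw [hstep, ih hl' r hr (cols ++ [cur]) [r]]
      have hg : pvGrp m (last :: r :: rs) = [last] :: pvGrp m (r :: rs) := by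
        simp only [pvGrp]; rw [if_neg h]
      rw [hg, hshape]
      simp

lemma pvA_row (m : Int) (l : List (List (String × Int))) (h : ∀ r ∈ l, r ≠ []) :
    (l.foldl (pvStepA m) (none, [])).2 = pvGrp m l := by
  cases l with
  | nil => rfl
  | cons r rs =>
    have hr : r ≠ [] := h r (by simp)
    have h' : ∀ x ∈ rs, x ≠ [] := fun x hx => h x (List.mem_cons_of_mem _ hx)
    obtain ⟨s, gs, hshape⟩ := pvGrp_shape m r rs
    simp only [List.foldl_cons]
    have hstep : pvStepA m (none, []) r = (some r, [] ++ [[r]]) := rfl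
    rw [hstep, pvA_inv m rs h' r hr [] [r], hshape]
    simp

lemma pvA_eq (rows : List (List (List (String × Int)))) (margin : Int) :
    sortAndDetectColumns_py rows margin
      = rows.map (fun row => ((PySem.List.sorted row (fun rect => pvGetX rect) false).foldl
          (pvStepA (margin * 4)) (none, [])).2) := by
  rw [show sortAndDetectColumns_py rows margin
      = rows.foldl (fun acc row => acc ++ [((PySem.List.sorted row (fun rect => pvGetX rect) false).foldl
          (pvStepA (margin * 4)) (none, [])).2]) [] from rfl,
    PySem.List.foldl_append_singleton_eq_map]
  simp

lemma pvB_eq (rows : List (List (List (String × Int)))) (margin : Int) :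
    sortAndDetectColumns_py_alt rows margin
      = rows.map (fun row => pvCols (margin * 4) (PySem.List.sorted row (fun r => pvGetX r) false)) :=
  rfl

lemma pvSliceShift (a : List (String × Int)) (l : List (List (String × Int))) (p q : Int)
    (hp : 0 ≤ p) (hq : 0 ≤ q) :
    PySem.List.slice (a :: l) (some (p + 1)) (some (q + 1)) = PySem.List.slice l (some p) (some q) := by
  lift p to ℕ using hp with i
  lift q to ℕ using hq with j
  rw [(by push_cast; ring : (i : Int) + 1 = ((i + 1 : ℕ) : Int)),
      (by push_cast; ring : (j : Int) + 1 = ((j + 1 : ℕ) : Int)),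
      PySem.List.slice_natCast, PySem.List.slice_natCast]
  simp

lemma pvSliceHead (a : List (String × Int)) (l : List (List (String × Int))) (q : Int) (hq : 0 ≤ q) :
    PySem.List.slice (a :: l) (some 0) (some (q + 1)) = a :: PySem.List.slice l (some 0) (some q) := by
  lift q to ℕ using hq with j
  rw [(by push_cast; ring : (j : Int) + 1 = ((j + 1 : ℕ) : Int)),
      (by norm_num : (0 : Int) = ((0 : ℕ) : Int)),
      PySem.List.slice_natCast, PySem.List.slice_natCast]
  simp

lemma pvSliceZero (l : List (List (String × Int))) : PySem.List.slice l (some 0) (some 0) = [] := by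
  rw [(by norm_num : (0 : Int) = ((0 : ℕ) : Int)), PySem.List.slice_natCast]; simp

lemma pvPieces_cons (l : List (List (String × Int))) (x y : Int) (bs : List Int) :
    pvPieces l (x :: y :: bs)
      = (if x < y then [PySem.List.slice l (some x) (some y)] else []) ++ pvPieces l (y :: bs) := by
  simp only [pvPieces, PySem.List.slice_from_one, List.tail_cons, List.zip_cons_cons,
    List.filter_cons]
  by_cases h : x < y <;> simp [h]

lemma pvSplits_pos (m : Int) (l : List (List (String × Int))) :
    ∀ x ∈ pvSplits m l, 1 ≤ x := by
  intro x hx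
  simp only [pvSplits, List.mem_map, List.mem_filter] at hx
  obtain ⟨p, ⟨hp, -⟩, rfl⟩ := hx
  rw [PySem.List.mem_enumerate_iff] at hp
  obtain ⟨k, hk, rfl⟩ := hp
  simp

lemma pvPieces_shift (a : List (String × Int)) (l : List (List (String × Int))) (bs : List Int)
    (hbs : ∀ x ∈ bs, 0 ≤ x) :
    pvPieces (a :: l) (bs.map (· + 1)) = pvPieces l bs := by
  simp only [pvPieces, PySem.List.slice_from_one, ← List.map_tail, List.zip_map, List.filter_map,
    List.map_map]
  have hcond : ((fun p : Int × Int => decide (p.1 < p.2)) ∘ Prod.map (· + 1) (· + 1))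
      = fun p : Int × Int => decide (p.1 < p.2) := by
    funext p; simp [Prod.map]
  rw [hcond]
  apply List.map_congr_left
  intro p hp
  have hmem := List.of_mem_zip (List.mem_of_mem_filter hp)
  have h1 : 0 ≤ p.1 := hbs _ hmem.1
  have h2 : 0 ≤ p.2 := hbs _ (List.tail_subset _ hmem.2)
  simp [Prod.map, Function.comp]
  exact pvSliceShift a l p.1 p.2 h1 h2

lemma pvSplits_cons (m : Int) (a b : List (String × Int)) (t : List (List (String × Int))) :
    pvSplits m (a :: b :: t)
      = (if m ≤ pvGetX b - pvGetX a then [(1 : Int)] else []) ++ (pvSplits m (b :: t)).map (· + 1) := by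
  simp only [pvSplits, PySem.List.slice_from_one, List.tail_cons, List.zip_cons_cons,
    PySem.List.enumerate_eq_zipIdx_map, List.zipIdx_cons, List.map_map, List.map_cons,
    List.filter_cons, List.filter_map]
  rw [List.zipIdx_succ]
  simp only [List.filter_map, List.map_map]
  by_cases h : m ≤ pvGetX b - pvGetX a <;>
    simp [h, List.map_map] <;>
    · apply List.map_congr_left; intro p hp; simp

lemma pvB_row (m : Int) : ∀ l, pvCols m l = pvGrp m l
  | [] => by
    simp [pvCols, pvSplits, pvPieces, PySem.List.slice_from_one, pvGrp]
  | [r] => by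
    simp only [pvCols, pvSplits, pvPieces, pvGrp, PySem.List.slice_from_one]
    norm_num
    rw [(by norm_num : (1 : Int) = ((1 : ℕ) : Int)), PySem.List.slice_to_natCast]
    simp
  | a :: b :: t => by
    have ih := pvB_row m (b :: t)
    have hpos := pvSplits_pos m (b :: t)
    have hnn : ∀ x ∈ (0 : Int) :: (pvSplits m (b :: t) ++ [((b :: t).length : Int)]), 0 ≤ x := by
      intro x hx
      simp only [List.mem_cons, List.mem_append] at hx
      rcases hx with rfl | h | h
      · norm_num
      · linarith [hpos x h]
      · rcases h with rfl | h
        · exact Int.natCast_nonneg _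
        · simp at h
    have hlen : ((a :: b :: t).length : Int) = ((b :: t).length : Int) + 1 := by simp
    have hbounds : [(0:Int)] ++ pvSplits m (a :: b :: t) ++ [((a :: b :: t).length : Int)]
        = 0 :: ((if m ≤ pvGetX b - pvGetX a then [(1:Int)] else [])
            ++ (pvSplits m (b :: t) ++ [((b :: t).length : Int)]).map (· + 1)) := by
      rw [pvSplits_cons, hlen]; simp
    by_cases h : m ≤ pvGetX b - pvGetX a
    · -- gap ≥ m: a new column starts at b
      have hgrp : pvGrp m (a :: b :: t) = [a] :: pvGrp m (b :: t) := by
        simp only [pvGrp]; rw [if_neg (by omega)]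
      rw [pvCols, hbounds, if_pos h]
      have h1 : (1 : Int) :: (pvSplits m (b :: t) ++ [((b :: t).length : Int)]).map (· + 1)
          = ((0 : Int) :: (pvSplits m (b :: t) ++ [((b :: t).length : Int)])).map (· + 1) := by
        simp
      simp only [List.cons_append, List.nil_append]
      rw [pvPieces_cons, if_pos (by norm_num : (0:Int) < 1), h1, pvPieces_shift _ _ _ hnn]
      rw [hgrp, ← ih, pvCols]
      have hsl : PySem.List.slice (a :: b :: t) (some 0) (some 1) = [a] := by
        have := pvSliceHead a (b :: t) 0 le_rfl
        rw [zero_add] at this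
        rw [this, pvSliceZero]
      rw [hsl]
      simp
    · -- gap < m: b stays in a's column
      obtain ⟨c1, cs, hc⟩ : ∃ c1 cs, pvSplits m (b :: t) ++ [((b :: t).length : Int)] = c1 :: cs := by
        cases hS : pvSplits m (b :: t) ++ [((b :: t).length : Int)] with
        | nil => exact absurd hS (by simp)
        | cons c1 cs => exact ⟨c1, cs, rfl⟩
      have hc1 : 1 ≤ c1 := by
        have : c1 ∈ pvSplits m (b :: t) ++ [((b :: t).length : Int)] := by rw [hc]; simp
        simp only [List.mem_append, List.mem_singleton] at this
        rcases this with h' | rfl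
        · exact hpos _ h'
        · simp
      have hgrp : pvGrp m (a :: b :: t)
          = (a :: (pvGrp m (b :: t)).headD []) :: (pvGrp m (b :: t)).tail := by
        simp only [pvGrp]; rw [if_pos (by omega)]
      have hColsbt : pvCols m (b :: t)
          = PySem.List.slice (b :: t) (some 0) (some c1) :: pvPieces (b :: t) (c1 :: cs) := by
        rw [pvCols]
        simp only [List.cons_append, List.nil_append]
        rw [hc, pvPieces_cons, if_pos (by omega)]
        simp
      rw [pvCols, hbounds, if_neg h]
      simp only [List.nil_append, hc, List.map_cons]
      rw [pvPieces_cons, if_pos (by omega)]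
      have hnn' : ∀ x ∈ c1 :: cs, 0 ≤ x := by
        intro x hx; apply hnn; rw [hc]; exact List.mem_cons_of_mem _ hx
      rw [show (c1 + 1) :: List.map (· + 1) cs = (c1 :: cs).map (· + 1) from by simp,
          pvPieces_shift _ _ _ hnn']
      rw [pvSliceHead a (b :: t) c1 (by omega), hgrp, ← ih, hColsbt]
      simp

-- ===== VERDICT (by name: the statement is the Claim_ definition above) =====
theorem sortAndDetectColumns_py_spec : Claim_equal_sortAndDetectColumns_py := by
  intro rows margin _ hpre
  unfold Spec_sortAndDetectColumns_py
  unfold Pre_sortAndDetectColumns_py at hpre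
  rw [List.all_eq_true] at hpre
  rw [pvA_eq, pvB_eq]
  apply List.map_congr_left
  intro row hrow
  have hrects : ∀ r ∈ PySem.List.sorted row (fun rect => pvGetX rect) false, r ≠ [] := by
    intro r hr
    have hrm : r ∈ row := (PySem.List.mem_sorted _ _ _ _).1 hr
    have hsome := List.all_eq_true.1 (hpre row hrow) r hrm
    intro hnil
    subst hnil
    simp at hsome
  rw [pvA_row _ _ hrects, pvB_row]
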